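-- pv_equiv track=rewrite | github.com/BrandyNguyen2/CPSC323-Assignment_1 | main1.py | fsm_integer_or_real
-- ===== SOURCE A (Python) =====
-- START = 0
--
-- INTEGER = 2
--
-- REAL = 3
--
-- ERROR = -1
--
-- def fsm_integer_or_real(char_stream):
--     state = START
--     lexeme = ""
--
--     for char in char_stream:
--         if state == START:
--             if char.isdigit():  # Start with a digit
--                 state = INTEGER
--                 lexeme += char
--             else:
--                 return ERROR, None  # Invalid start for integer/real
--
--         elif state == INTEGER:
--             if char.isdigit():  # Continue reading digits
--                 lexeme += char
--             elif char == ".":  # Transition to real number state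
--                 state = REAL
--                 lexeme += char
--             else:
--                 break  # End of integer
--
--         elif state == REAL:
--             if char.isdigit():  # Continue reading real number digits
--                 lexeme += char
--             else:
--                 break  # End of real number
--
--     return state, lexeme if state == INTEGER or state == REAL else (ERROR, None)
-- ===== SOURCE B (Python) =====
-- def fsm_integer_or_real(char_stream):
--     # Phased recursive-descent scan over an iterator: no state variable,
--     # each phase is its own loop.
--     it = iter(char_stream)
--     first = next(it, None)
--     if first is None or not first.isdigit():
--         return (-1, None)
--     lexeme = first
--     # integer phase
--     for c in it:
--         if c.isdigit():
--             lexeme += c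
--         elif c == '.':
--             lexeme += c
--             break
--         else:
--             return (2, lexeme)
--     else:
--         return (2, lexeme)
--     # real phase
--     for c in it:
--         if not c.isdigit():
--             break
--         lexeme += c
--     return (3, lexeme)
-- ===== Notes on version B (the rewrite author's own statement) =====
-- stated objective: simpler
-- what changed: Replaced the single loop dispatching on a numeric state variable by a phased scan over one shared iterator (first-char check, then an integer loop, then a real loop), so the state variable and state constants disappear.
-- outside the precondition, e.g. on fsm_integer_or_real(''): A returns (0, (-1, None)), B returns (-1, None)
import Mathlib
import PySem

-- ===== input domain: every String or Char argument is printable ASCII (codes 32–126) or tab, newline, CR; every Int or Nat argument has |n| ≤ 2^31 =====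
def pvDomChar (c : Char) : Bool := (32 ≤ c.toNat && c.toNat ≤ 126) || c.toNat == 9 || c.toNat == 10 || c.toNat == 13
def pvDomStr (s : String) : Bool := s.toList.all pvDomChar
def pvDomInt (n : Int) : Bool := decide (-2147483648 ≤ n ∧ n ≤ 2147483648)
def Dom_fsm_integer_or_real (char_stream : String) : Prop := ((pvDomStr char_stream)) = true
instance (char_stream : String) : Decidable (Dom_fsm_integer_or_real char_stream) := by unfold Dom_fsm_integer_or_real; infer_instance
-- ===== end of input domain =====

-- B replaces A's state-variable FSM loop by a phased scan (first char, integer loop, real loop): simpler, same O(n) cost.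


-- ===== PORT A =====
-- the loop: recursion over the remaining chars carrying (state, lexeme);
-- Python's str.isdigit coincides with Char.isDigit on the ASCII domain.
-- On loop exit (end of stream or break) A executes its final return; state 0 at loop end
-- only happens on the empty stream, where A's value (0, (-1, None)) is not of the declared
-- type — excluded by Pre_, the port returns an arbitrary value (0, none) there.
def fsmLoopA : List Char → Int → String → Int × Option String
  | [], state, lexeme =>
      (state, if state = 2 ∨ state = 3 then some lexeme else none)
  | c :: rest, state, lexeme =>
      if state = 0 then
        if c.isDigit then fsmLoopA rest 2 (lexeme.push c)
        else (-1, none)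
      else if state = 2 then
        if c.isDigit then fsmLoopA rest 2 (lexeme.push c)
        else if c = '.' then fsmLoopA rest 3 (lexeme.push c)
        else (state, if state = 2 ∨ state = 3 then some lexeme else none)  -- break
      else if state = 3 then
        if c.isDigit then fsmLoopA rest 3 (lexeme.push c)
        else (state, if state = 2 ∨ state = 3 then some lexeme else none)  -- break
      else fsmLoopA rest state lexeme  -- unreachable branch of the if-chain

def fsm_integer_or_real (char_stream : String) : Int × Option String :=
  fsmLoopA char_stream.toList 0 ""

-- ===== PORT B =====
-- real phase: consume digits until a non-digit or exhaustion
def fsmRealB : List Char → String → Int × Option String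
  | [], lexeme => (3, some lexeme)
  | c :: rest, lexeme =>
      if ¬ c.isDigit then (3, some lexeme)
      else fsmRealB rest (lexeme.push c)

-- integer phase: digits continue, '.' hands the rest of the iterator to the real phase
def fsmIntB : List Char → String → Int × Option String
  | [], lexeme => (2, some lexeme)
  | c :: rest, lexeme =>
      if c.isDigit then fsmIntB rest (lexeme.push c)
      else if c = '.' then fsmRealB rest (lexeme.push c)
      else (2, some lexeme)

def fsm_integer_or_real_alt (char_stream : String) : Int × Option String :=
  match char_stream.toList with
  | [] => (-1, none)                       -- next(it, None) is None
  | first :: rest =>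
      if ¬ first.isDigit then (-1, none)
      else fsmIntB rest (String.push "" first)

-- ===== PRECONDITION & SPEC =====
-- Pre_ excludes only the empty stream, on which A returns (0, (-1, None)) — a nested
-- tuple, not a value of the declared (int, Optional[str]) type.
def Pre_fsm_integer_or_real (char_stream : String) : Prop := char_stream ≠ ""
instance (char_stream : String) : Decidable (Pre_fsm_integer_or_real char_stream) := by
  unfold Pre_fsm_integer_or_real; infer_instance
def pvWitness_fsm_integer_or_real : String := "12.5"

def Spec_fsm_integer_or_real (char_stream : String) (out : Int × Option String) : Prop := out = fsm_integer_or_real_alt char_stream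
instance (char_stream : String) (out : Int × Option String) : Decidable (Spec_fsm_integer_or_real char_stream out) := by unfold Spec_fsm_integer_or_real; infer_instance

-- ===== CLAIM (what is proved, stated in full; the proofs are below) =====
def Claim_equal_fsm_integer_or_real : Prop := ∀ (char_stream : String), Dom_fsm_integer_or_real char_stream → Pre_fsm_integer_or_real char_stream → Spec_fsm_integer_or_real char_stream (fsm_integer_or_real char_stream)

-- ===== LEMMAS AND PROOFS =====
theorem loopA_state3 (cs : List Char) (lexeme : String) :
    fsmLoopA cs 3 lexeme = fsmRealB cs lexeme := by
  induction cs generalizing lexeme with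
  | nil => simp [fsmLoopA, fsmRealB]
  | cons c rest ih =>
      by_cases h : c.isDigit <;> simp [fsmLoopA, fsmRealB, h, ih]

theorem loopA_state2 (cs : List Char) (lexeme : String) :
    fsmLoopA cs 2 lexeme = fsmIntB cs lexeme := by
  induction cs generalizing lexeme with
  | nil => simp [fsmLoopA, fsmIntB]
  | cons c rest ih =>
      by_cases h : c.isDigit
      · simp [fsmLoopA, fsmIntB, h, ih]
      · by_cases hd : c = '.' <;> simp [fsmLoopA, fsmIntB, h, hd, loopA_state3]

-- ===== VERDICT (by name: the statement is the Claim_ definition above) =====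
theorem fsm_integer_or_real_spec : Claim_equal_fsm_integer_or_real := by
  intro s _ hpre
  unfold Spec_fsm_integer_or_real fsm_integer_or_real fsm_integer_or_real_alt
  match h : s.toList with
  | [] => exact absurd (by simpa using congrArg String.ofList h) hpre
  | c :: rest =>
      by_cases hc : c.isDigit <;>
        simp [fsmLoopA, hc, loopA_state2]
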